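-- pv_equiv track=rewrite | github.com/Zephyrum-Alsend/School-Projects | 2015-2016/Old/Python Programs/EX15.py | charonly
-- ===== SOURCE A (Python) =====
-- def charonly(str1):
-- 	chars = 'abcdefghijklmnopqrstuvwxyz'
-- 	str1 = str1.lower()
-- 	str2 = ''
-- 	for x in str1:
-- 		if x in chars:
-- 			str2 += x
-- 	return str2
-- ===== SOURCE B (Python) =====
-- import re
--
-- def charonly(str1):
--     return re.sub(r'[^a-z]', '', str1.lower())
-- ===== Notes on version B (the rewrite author's own statement) =====
-- stated objective: faster
-- what changed: Replaced the explicit per-character loop with quadratic string concatenation by a single re.sub call deleting every character outside ASCII a-z from the lowered string.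
import Mathlib
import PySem

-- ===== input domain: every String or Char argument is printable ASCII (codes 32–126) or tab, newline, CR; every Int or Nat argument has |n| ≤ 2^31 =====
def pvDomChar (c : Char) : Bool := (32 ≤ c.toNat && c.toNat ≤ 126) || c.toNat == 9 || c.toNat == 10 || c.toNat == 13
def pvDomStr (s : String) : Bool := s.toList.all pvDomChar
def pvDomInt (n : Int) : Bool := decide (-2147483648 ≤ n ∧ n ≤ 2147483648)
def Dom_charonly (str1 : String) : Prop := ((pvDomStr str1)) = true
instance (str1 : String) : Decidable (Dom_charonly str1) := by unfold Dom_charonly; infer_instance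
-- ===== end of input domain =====

-- B replaces A's per-character loop with string concatenation by a single re.sub deleting
-- every character outside ASCII a-z from the lowered string (idiomatic, one library call).

-- ===== PORT A =====
-- chars = 'abcdefghijklmnopqrstuvwxyz', written out as its list of characters
def charonlyChars : List Char :=
  ['a','b','c','d','e','f','g','h','i','j','k','l','m',
   'n','o','p','q','r','s','t','u','v','w','x','y','z']

-- the for-loop: str2 accumulator, append x when x in chars
def charonlyLoop : List Char → List Char → List Char
  | acc, [] => acc
  | acc, x :: xs => charonlyLoop (if charonlyChars.contains x then acc ++ [x] else acc) xs

def charonly (str1 : String) : String :=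
  String.mk (charonlyLoop [] (PySem.Chars.lower str1.toList))

-- ===== PORT B =====
-- re.sub(r'[^a-z]', '', s) : delete every char outside the ASCII range 'a'..'z' in one pass
def charonly_alt (str1 : String) : String :=
  String.mk ((PySem.Chars.lower str1.toList).filter (fun c => 'a' ≤ c && c ≤ 'z'))

-- ===== PRECONDITION & SPEC =====
def Spec_charonly (str1 : String) (out : String) : Prop := out = charonly_alt str1
instance (str1 : String) (out : String) : Decidable (Spec_charonly str1 out) := by unfold Spec_charonly; infer_instance

-- ===== CLAIM (what is proved, stated in full; the proofs are below) =====
def Claim_equal_charonly : Prop := ∀ (str1 : String), Dom_charonly str1 → Spec_charonly str1 (charonly str1)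

-- ===== LEMMAS AND PROOFS =====
-- membership in the 26-letter string equals the ASCII range test
theorem mem_charonlyChars (c : Char) :
    charonlyChars.contains c = ('a' ≤ c && c ≤ 'z') := by
  have h : ∀ d : Char, (c == d) = (c.toNat == d.toNat) := by
    intro d; rcases c with ⟨⟨⟨v,hv⟩⟩,h1⟩; rcases d with ⟨⟨⟨w,hw⟩⟩,h2⟩
    simp [Char.toNat, UInt32.toNat, Char.ext_iff, UInt32.ext_iff]
  have hle : ∀ d e : Char, (d ≤ e) ↔ (d.toNat ≤ e.toNat) := fun _ _ => Iff.rfl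
  simp only [charonlyChars, List.contains_eq_any_beq, List.any_cons, List.any_nil, h]
  show _ = (decide ('a' ≤ c) && decide (c ≤ 'z'))
  simp only [hle]
  show _ = (decide (97 ≤ c.toNat) && decide (c.toNat ≤ 122))
  generalize c.toNat = n
  rw [Bool.eq_iff_iff]
  simp
  omega

theorem charonlyLoop_eq_filter (xs acc : List Char) :
    charonlyLoop acc xs = acc ++ xs.filter (fun c => 'a' ≤ c && c ≤ 'z') := by
  induction xs generalizing acc with
  | nil => simp [charonlyLoop]
  | cons x xs ih =>
    simp only [charonlyLoop, mem_charonlyChars, List.filter_cons]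
    by_cases h : ('a' ≤ x && x ≤ 'z') = true <;> simp [h, ih]

-- ===== VERDICT (by name: the statement is the Claim_ definition above) =====
theorem charonly_spec : Claim_equal_charonly := by
  intro str1 _
  unfold Spec_charonly charonly charonly_alt
  rw [charonlyLoop_eq_filter]
  simp
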